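-- pv_equiv track=rewrite | github.com/numnum5/MYRES2025 | detailExtractor.py | sort_by_columns
-- ===== SOURCE A (Python) =====
-- def sort_by_columns(data, threshold = 15):
--     data = sorted(data, key=lambda x: x[0])
--
--     column_groups = []
--     current_column = []
--
--     for c in data:
--         if len(current_column) == 0:
--             current_column.append(c)
--         elif abs(c[0] - current_column[-1][0]) <= threshold:
--             current_column.append(c)
--         else:
--             column_groups.append(current_column)
--             current_column = [c]
--                 # Add the last column if it exists
--     if current_column:
--         column_groups.append(current_column)
--
--     return column_groups
-- ===== SOURCE B (Python) =====
-- def sort_by_columns(data, threshold=15):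
--     s = sorted(data, key=lambda x: x[0])
--     if not s:
--         return []
--     breaks = [i for i, (a, b) in enumerate(zip(s, s[1:]), 1)
--               if abs(b[0] - a[0]) > threshold]
--     bounds = [0] + breaks + [len(s)]
--     return [s[a:b] for a, b in zip(bounds, bounds[1:])]
-- ===== Notes on version B (the rewrite author's own statement) =====
-- stated objective: alternative
-- what changed: A's accumulate-and-flush loop with mutable current_column state is replaced by computing the list of break positions between adjacent sorted elements and slicing the sorted list between consecutive boundaries via a comprehension.
import Mathlib
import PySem

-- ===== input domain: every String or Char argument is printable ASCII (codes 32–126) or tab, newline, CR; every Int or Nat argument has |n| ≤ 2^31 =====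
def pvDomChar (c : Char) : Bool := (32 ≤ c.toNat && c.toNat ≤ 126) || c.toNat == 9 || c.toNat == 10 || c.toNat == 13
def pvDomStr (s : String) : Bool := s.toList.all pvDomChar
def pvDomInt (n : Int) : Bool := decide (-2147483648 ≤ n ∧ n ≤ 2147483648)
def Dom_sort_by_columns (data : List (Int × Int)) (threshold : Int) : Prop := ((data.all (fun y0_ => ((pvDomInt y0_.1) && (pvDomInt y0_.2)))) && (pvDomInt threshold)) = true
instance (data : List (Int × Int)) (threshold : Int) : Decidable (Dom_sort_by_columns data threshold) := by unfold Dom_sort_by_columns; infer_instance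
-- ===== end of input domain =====

-- B replaces A's accumulate-and-flush loop by computing the break indices between adjacent
-- sorted elements and slicing the sorted list at those cuts (alternative decomposition, same cost).


-- ===== PORT A =====
-- A's for-loop over the sorted data, with state (column_groups, current_column).
def pvALoop (threshold : Int) : List (Int × Int) → List (List (Int × Int)) → List (Int × Int) → List (List (Int × Int)) × List (Int × Int)
  | [], gs, cur => (gs, cur)
  | c :: rest, gs, cur =>
      if PySem.List.len cur = 0 then
        pvALoop threshold rest gs (cur ++ [c])
      else if |c.1 - (PySem.List.pyGetD cur (-1) (0, 0)).1| ≤ threshold then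
        pvALoop threshold rest gs (cur ++ [c])
      else
        pvALoop threshold rest (gs ++ [cur]) [c]

def sort_by_columns (data : List (Int × Int)) (threshold : Int) : List (List (Int × Int)) :=
  let d := PySem.List.sorted data (fun x => x.1) false
  let r := pvALoop threshold d [] []
  if r.2 ≠ [] then r.1 ++ [r.2] else r.1

-- ===== PORT B =====
-- B: sort, list the break positions i (1-based, gap to the previous element > threshold),
-- then return the slices between consecutive boundaries.
def sort_by_columns_alt (data : List (Int × Int)) (threshold : Int) : List (List (Int × Int)) :=
  let s := PySem.List.sorted data (fun x => x.1) false
  if s = [] then []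
  else
    let breaks := ((PySem.List.enumerate (s.zip (PySem.List.slice s (some 1) none)) 1).filter
        (fun ib => decide (threshold < |ib.2.2.1 - ib.2.1.1|))).map (fun ib => ib.1)
    let bounds := 0 :: (breaks ++ [PySem.List.len s])
    (bounds.zip bounds.tail).map (fun ab => PySem.List.slice s (some ab.1) (some ab.2))

-- ===== PRECONDITION & SPEC =====
def Spec_sort_by_columns (data : List (Int × Int)) (threshold : Int) (out : List (List (Int × Int))) : Prop := out = sort_by_columns_alt data threshold
instance (data : List (Int × Int)) (threshold : Int) (out : List (List (Int × Int))) : Decidable (Spec_sort_by_columns data threshold out) := by unfold Spec_sort_by_columns; infer_instance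

-- ===== CLAIM (what is proved, stated in full; the proofs are below) =====
def Claim_equal_sort_by_columns : Prop := ∀ (data : List (Int × Int)) (threshold : Int), Dom_sort_by_columns data threshold → Spec_sort_by_columns data threshold (sort_by_columns data threshold)

-- ===== LEMMAS AND PROOFS =====

-- Reference grouping: group a list into maximal runs of adjacent elements with |gap| ≤ t.
def pvChunksFrom (t : Int) (acc : List (Int × Int)) (p : Int × Int) : List (Int × Int) → List (List (Int × Int))
  | [] => [acc]
  | c :: rest =>
      if |c.1 - p.1| ≤ t then pvChunksFrom t (acc ++ [c]) c rest
      else acc :: pvChunksFrom t [c] c rest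

def pvChunks (t : Int) : List (Int × Int) → List (List (Int × Int))
  | [] => []
  | c :: rest => pvChunksFrom t [c] c rest

-- adjacent pairs of a list
def pvAdj : List (Int × Int) → List ((Int × Int) × (Int × Int))
  | a :: b :: rest => (a, b) :: pvAdj (b :: rest)
  | _ => []

-- the body of B after sorting, as a function of the sorted list
def pvBBody (t : Int) (s : List (Int × Int)) : List (List (Int × Int)) :=
  let breaks := ((PySem.List.enumerate (s.zip s.tail) 1).filter
      (fun ib => decide (t < |ib.2.2.1 - ib.2.1.1|))).map (fun ib => ib.1)
  let bounds := 0 :: (breaks ++ [PySem.List.len s])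
  (bounds.zip bounds.tail).map (fun ab => PySem.List.slice s (some ab.1) (some ab.2))

def pvBreaks (t : Int) (s : List (Int × Int)) : List Int :=
  ((PySem.List.enumerate (pvAdj s) 1).filter
      (fun ib => decide (t < |ib.2.2.1 - ib.2.1.1|))).map (fun ib => ib.1)

lemma pv_zip_tail_eq_adj : ∀ s : List (Int × Int), s.zip s.tail = pvAdj s := by
  intro s
  induction s with
  | nil => rfl
  | cons a s ih =>
      cases s with
      | nil => rfl
      | cons b r =>
          simp only [List.tail_cons, List.zip_cons_cons, pvAdj]
          simpa using ih

lemma pvALoop_eq (t : Int) : ∀ (xs : List (Int × Int)) (gs : List (List (Int × Int))) (cs : List (Int × Int)) (p : Int × Int),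
    (fun r : List (List (Int × Int)) × List (Int × Int) => if r.2 ≠ [] then r.1 ++ [r.2] else r.1)
      (pvALoop t xs gs (cs ++ [p])) = gs ++ pvChunksFrom t (cs ++ [p]) p xs := by
  intro xs
  induction xs with
  | nil =>
      intro gs cs p
      simp [pvALoop, pvChunksFrom]
  | cons c rest ih =>
      intro gs cs p
      have hne : cs ++ [p] ≠ [] := by simp
      have hlen : PySem.List.len (cs ++ [p]) ≠ 0 := by
        simp [PySem.List.len_eq]
        omega
      rw [pvALoop, if_neg hlen, PySem.List.pyGetD_neg_one_append_singleton]
      by_cases hgap : |c.1 - p.1| ≤ t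
      · rw [if_pos hgap]
        have := ih gs (cs ++ [p]) c
        simpa [pvChunksFrom, hgap] using this
      · rw [if_neg hgap]
        have := ih (gs ++ [cs ++ [p]]) [] c
        simp only [List.nil_append] at this
        simp [pvChunksFrom, hgap, this]

lemma pvA_eq_chunks (data : List (Int × Int)) (t : Int) :
    sort_by_columns data t = pvChunks t (PySem.List.sorted data (fun x => x.1) false) := by
  unfold sort_by_columns
  cases h : PySem.List.sorted data (fun x => x.1) false with
  | nil => simp [pvALoop, pvChunks]
  | cons c rest =>
      have h0 : PySem.List.len ([] : List (Int × Int)) = 0 := by simp [PySem.List.len_eq]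
      have := pvALoop_eq t rest [] [] c
      simp only [List.nil_append] at this
      show (fun r : List (List (Int × Int)) × List (Int × Int) =>
          if r.2 ≠ [] then r.1 ++ [r.2] else r.1)
          (pvALoop t (c :: rest) [] []) = pvChunks t (c :: rest)
      rw [pvALoop.eq_def]
      simp only [h0]
      simpa [pvChunks] using this

lemma pv_enumerate_shift {α : Type} (k : Int) : ∀ (l : List α) (i : Int),
    PySem.List.enumerate l (k + i) = (PySem.List.enumerate l i).map (fun p => (p.1 + k, p.2)) := by
  intro l
  induction l with
  | nil => intro i; rfl
  | cons x xs ih =>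
      intro i
      rw [PySem.List.enumerate_cons, PySem.List.enumerate_cons, List.map_cons,
        show k + i + 1 = k + (i + 1) by ring, ih]
      simp [add_comm]

lemma pvAdj_cons_head (a : Int × Int) (v : List (Int × Int)) (hv : v ≠ []) :
    pvAdj (a :: v) = (a, v.head hv) :: pvAdj v := by
  cases v with
  | nil => exact absurd rfl hv
  | cons c r => rfl

lemma pvAdj_append : ∀ (u v : List (Int × Int)) (hu : u ≠ []) (hv : v ≠ []),
    pvAdj (u ++ v) = pvAdj u ++ (u.getLast hu, v.head hv) :: pvAdj v := by
  intro u
  induction u with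
  | nil => intro v hu hv; exact absurd rfl hu
  | cons a u' ih =>
      intro v hu hv
      cases u' with
      | nil =>
          simp only [List.cons_append, List.nil_append]
          rw [pvAdj_cons_head a v hv]
          rfl
      | cons b u'' =>
          simp only [List.cons_append]
          rw [show pvAdj (a :: b :: (u'' ++ v)) = (a, b) :: pvAdj (b :: (u'' ++ v)) from rfl]
          have := ih v (by simp) hv
          rw [show (b :: u'') ++ v = b :: (u'' ++ v) from rfl] at this
          rw [this]
          simp [pvAdj, List.getLast_cons]

lemma pvAdj_length : ∀ l : List (Int × Int), (pvAdj l).length = l.length - 1 := by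
  intro l
  induction l with
  | nil => rfl
  | cons a l ih =>
      cases l with
      | nil => rfl
      | cons b r => simp [pvAdj] at ih ⊢; omega

lemma pv_chain_adj {R : (Int × Int) → (Int × Int) → Prop} :
    ∀ l : List (Int × Int), List.IsChain R l → ∀ q ∈ pvAdj l, R q.1 q.2 := by
  intro l
  induction l with
  | nil => intro _ q hq; simp [pvAdj] at hq
  | cons a l ih =>
      cases l with
      | nil => intro _ q hq; simp [pvAdj] at hq
      | cons b r =>
          intro hch q hq
          rw [List.isChain_cons_cons] at hch
          rw [show pvAdj (a :: b :: r) = (a, b) :: pvAdj (b :: r) from rfl, List.mem_cons] at hq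
          rcases hq with hq | hq
          · exact hq ▸ hch.1
          · exact ih hch.2 q hq

lemma pv_mem_snd_enumerate {α : Type} {l : List α} {s : Int} {p : Int × α}
    (h : p ∈ PySem.List.enumerate l s) : p.2 ∈ l := by
  have : p.2 ∈ (PySem.List.enumerate l s).map (fun x => x.2) := List.mem_map_of_mem h
  rwa [PySem.List.map_snd_enumerate] at this

lemma pvBreaks_ge_one (t : Int) (s : List (Int × Int)) :
    ∀ x ∈ pvBreaks t s, 1 ≤ x := by
  intro x hx
  unfold pvBreaks at hx
  obtain ⟨p, hp, hfst⟩ := List.mem_map.mp hx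
  have hp' : p ∈ PySem.List.enumerate (pvAdj s) 1 := List.mem_of_mem_filter hp
  have : p.1 ∈ (PySem.List.enumerate (pvAdj s) 1).map (fun x => x.1) := List.mem_map_of_mem hp'
  rw [PySem.List.map_fst_enumerate] at this
  have := (PySem.List.mem_pyRange_one).mp this
  omega

lemma pvChunksFrom_decomp (t : Int) : ∀ (xs acc : List (Int × Int)) (p : Int × Int), acc ≠ [] →
    (∀ h : acc ≠ [], acc.getLast h = p) →
    ∃ run v, xs = run ++ v ∧
      pvChunksFrom t acc p xs = (acc ++ run) :: pvChunks t v ∧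
      List.IsChain (fun a b : Int × Int => |b.1 - a.1| ≤ t) (p :: run) ∧
      (∀ hv : v ≠ [], t < |(v.head hv).1 - ((p :: run).getLast (by simp)).1|) := by
  intro xs
  induction xs with
  | nil =>
      intro acc p _ _
      exact ⟨[], [], by simp, by simp [pvChunksFrom, pvChunks], .singleton p, by simp⟩
  | cons c rest ih =>
      intro acc p hacc hlast
      by_cases hgap : |c.1 - p.1| ≤ t
      · obtain ⟨run', v, hxs, heq, hchain, hl⟩ := ih (acc ++ [c]) c (by simp)
          (by intro _; simp)
        refine ⟨c :: run', v, by simp [hxs], ?_, ?_, ?_⟩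
        · rw [show pvChunksFrom t acc p (c :: rest)
              = if |c.1 - p.1| ≤ t then pvChunksFrom t (acc ++ [c]) c rest
                else acc :: pvChunksFrom t [c] c rest from rfl, if_pos hgap, heq]
          simp
        · exact List.isChain_cons_cons.mpr ⟨hgap, hchain⟩
        · intro hv
          have := hl hv
          rwa [show (p :: c :: run').getLast (by simp) = (c :: run').getLast (by simp)
              from List.getLast_cons _]
      · refine ⟨[], c :: rest, by simp, ?_, .singleton p, ?_⟩
        · rw [show pvChunksFrom t acc p (c :: rest)
              = if |c.1 - p.1| ≤ t then pvChunksFrom t (acc ++ [c]) c rest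
                else acc :: pvChunksFrom t [c] c rest from rfl, if_neg hgap]
          simp [pvChunks]
        · intro hv
          simpa using not_le.mp hgap

lemma pvBreaks_append (t : Int) (u v : List (Int × Int)) (hu : u ≠ []) (hv : v ≠ [])
    (hchain : List.IsChain (fun a b : Int × Int => |b.1 - a.1| ≤ t) u)
    (hcut : t < |(v.head hv).1 - (u.getLast hu).1|) :
    pvBreaks t (u ++ v)
      = (u.length : Int) :: (pvBreaks t v).map (fun x => x + (u.length : Int)) := by
  unfold pvBreaks
  rw [pvAdj_append u v hu hv, PySem.List.enumerate_append]
  have hstart : (1 : Int) + ((pvAdj u).length : Int) = (u.length : Int) := by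
    have h2 : (pvAdj u).length = u.length - 1 := pvAdj_length u
    have h3 : 0 < u.length := List.length_pos_of_ne_nil hu
    omega
  rw [hstart, PySem.List.enumerate_cons,
    pv_enumerate_shift (u.length : Int) (pvAdj v) 1, List.filter_append, List.filter_cons]
  have h1 : (PySem.List.enumerate (pvAdj u) 1).filter
      (fun ib => decide (t < |ib.2.2.1 - ib.2.1.1|)) = [] := by
    apply List.filter_eq_nil_iff.mpr
    intro a ha
    have := pv_chain_adj u hchain a.2 (pv_mem_snd_enumerate ha)
    simp only [decide_eq_true_eq, not_lt]
    exact this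
  rw [h1, if_pos (by simpa using hcut)]
  rw [List.filter_map]
  simp only [List.nil_append, List.map_cons, List.map_map]
  rfl

def pvBounds (t : Int) (s : List (Int × Int)) : List Int :=
  0 :: (pvBreaks t s ++ [PySem.List.len s])

lemma pvBBody_eq (t : Int) (s : List (Int × Int)) :
    pvBBody t s = ((pvBounds t s).zip (pvBounds t s).tail).map
      (fun ab => PySem.List.slice s (some ab.1) (some ab.2)) := by
  unfold pvBBody pvBounds pvBreaks
  rw [pv_zip_tail_eq_adj]

lemma pvBreaks_eq_nil (t : Int) (s : List (Int × Int))
    (hchain : List.IsChain (fun a b : Int × Int => |b.1 - a.1| ≤ t) s) :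
    pvBreaks t s = [] := by
  unfold pvBreaks
  rw [List.filter_eq_nil_iff.mpr, List.map_nil]
  intro a ha
  have := pv_chain_adj s hchain a.2 (pv_mem_snd_enumerate ha)
  simp only [decide_eq_true_eq, not_lt]
  exact this

lemma pvBounds_nonneg (t : Int) (v : List (Int × Int)) :
    ∀ x ∈ pvBounds t v, 0 ≤ x := by
  intro x hx
  rcases List.mem_cons.mp hx with h | h
  · omega
  · rcases List.mem_append.mp h with h | h
    · have := pvBreaks_ge_one t v x h
      omega
    · simp only [List.mem_singleton] at h
      rw [h, PySem.List.len_eq]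
      positivity

lemma pv_slice_shift (u v : List (Int × Int)) (a b : Int) (ha : 0 ≤ a) (hb : 0 ≤ b) :
    PySem.List.slice (u ++ v) (some (a + (u.length : Int))) (some (b + (u.length : Int)))
      = PySem.List.slice v (some a) (some b) := by
  rw [PySem.List.slice_toNat _ (by omega) (by omega), PySem.List.slice_toNat _ ha hb]
  have h2 : (b + (u.length : Int)).toNat - (a + (u.length : Int)).toNat = b.toNat - a.toNat := by
    omega
  have h1 : (a + (u.length : Int)).toNat = u.length + a.toNat := by omega
  rw [h2, h1, List.drop_append]
  have h3 : List.drop (u.length + a.toNat) u = [] := List.drop_eq_nil_of_le (by omega)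
  have h4 : u.length + a.toNat - u.length = a.toNat := by omega
  rw [h3, h4, List.nil_append]

lemma pv_zip_bounds {f : Int → Int} (bt : List Int) :
    ((0 : Int) :: List.map f (0 :: bt)).zip ((0 : Int) :: List.map f (0 :: bt)).tail
      = (0, f 0) :: List.map (Prod.map f f) ((0 :: bt).zip bt) := by
  rw [List.tail_cons, List.map_cons, List.zip_cons_cons]
  congr 1
  rw [show (f 0 :: List.map f bt) = List.map f (0 :: bt) from rfl, List.zip_map]

lemma pvB_eq_chunks (t : Int) : ∀ s : List (Int × Int), s ≠ [] → pvBBody t s = pvChunks t s := by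
  have main : ∀ (n : Nat) (s : List (Int × Int)), s.length ≤ n → s ≠ [] →
      pvBBody t s = pvChunks t s := by
    intro n
    induction n with
    | zero =>
        intro s hl hne
        cases s with
        | nil => exact absurd rfl hne
        | cons a l => simp at hl
    | succ n ih =>
        intro s hl hne
        cases s with
        | nil => exact absurd rfl hne
        | cons c rest =>
        obtain ⟨run, v, hxs, heq, hchain, hcut⟩ :=
          pvChunksFrom_decomp t rest [c] c (by simp) (fun _ => rfl)
        have hsu : c :: rest = (c :: run) ++ v := by simp [hxs]
        have hchunks : pvChunks t (c :: rest) = (c :: run) :: pvChunks t v := by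
          rw [show pvChunks t (c :: rest) = pvChunksFrom t [c] c rest from rfl, heq]
          simp
        by_cases hv : v = []
        · subst hv
          have hs' : c :: rest = c :: run := by simpa using hsu
          rw [hchunks, pvBBody_eq]
          have hbrk : pvBreaks t (c :: rest) = [] := by
            rw [hs']
            exact pvBreaks_eq_nil t _ hchain
          unfold pvBounds
          rw [hbrk]
          simp only [List.nil_append, List.tail_cons, List.zip_cons_cons, List.zip_nil_right,
            List.map_cons, List.map_nil]
          rw [PySem.List.len_eq, PySem.List.slice_zero_start, PySem.List.slice_to_natCast,
            List.take_length]
          have hr : rest = run := by injection hs'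
          subst hr
          simp [pvChunks]
        · have hu : (c :: run) ≠ [] := by simp
          have hbrk : pvBreaks t (c :: rest)
              = ((c :: run).length : Int)
                :: (pvBreaks t v).map (fun x => x + ((c :: run).length : Int)) := by
            rw [hsu]
            exact pvBreaks_append t (c :: run) v hu hv hchain (hcut hv)
          have hlen : PySem.List.len (c :: rest)
              = PySem.List.len v + ((c :: run).length : Int) := by
            rw [PySem.List.len_eq, PySem.List.len_eq, hsu, List.length_append]
            push_cast
            ring
          have hbounds : pvBounds t (c :: rest)
              = 0 :: (pvBounds t v).map (fun x => x + ((c :: run).length : Int)) := by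
            unfold pvBounds
            rw [hbrk, hlen]
            simp
          rw [pvBBody_eq, hbounds, hchunks]
          have hbv : pvBounds t v = 0 :: (pvBreaks t v ++ [PySem.List.len v]) := rfl
          rw [hbv, pv_zip_bounds]
          simp only [List.map_cons, List.map_map]
          have hfirst : PySem.List.slice (c :: rest) (some 0)
              (some ((0 : Int) + ((c :: run).length : Int))) = c :: run := by
            rw [zero_add, hsu, PySem.List.slice_zero_start, PySem.List.slice_to_natCast]
            exact List.take_left
          rw [hfirst]
          congr 1
          have hrest : ∀ ab ∈ ((0 : Int) :: (pvBreaks t v ++ [PySem.List.len v])).zip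
              (pvBreaks t v ++ [PySem.List.len v]),
              ((fun ab : Int × Int => PySem.List.slice (c :: rest) (some ab.1) (some ab.2)) ∘
                Prod.map (fun x => x + ((c :: run).length : Int))
                  (fun x => x + ((c :: run).length : Int))) ab
              = (fun ab : Int × Int => PySem.List.slice v (some ab.1) (some ab.2)) ab := by
            intro ab hab
            obtain ⟨h1, h2⟩ := List.of_mem_zip hab
            have ha : 0 ≤ ab.1 := pvBounds_nonneg t v ab.1 (hbv ▸ h1)
            have hb : 0 ≤ ab.2 := pvBounds_nonneg t v ab.2 (by
              rw [hbv]
              exact List.mem_cons_of_mem _ h2)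
            simp only [Function.comp, Prod.map]
            rw [hsu]
            exact pv_slice_shift (c :: run) v ab.1 ab.2 ha hb
          rw [List.map_congr_left hrest]
          have hvlen : v.length ≤ n := by
            have hlen2 : (c :: rest).length = (c :: run).length + v.length := by
              rw [hsu, List.length_append]
            simp only [List.length_cons] at hl hlen2
            omega
          have hBv : pvBBody t v = pvChunks t v := ih v hvlen hv
          rw [← hBv, pvBBody_eq, hbv]
          rfl
  intro s hne
  exact main s.length s le_rfl hne

-- ===== VERDICT (by name: the statement is the Claim_ definition above) =====
theorem sort_by_columns_spec : Claim_equal_sort_by_columns := by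
  intro data t _
  unfold Spec_sort_by_columns
  rw [pvA_eq_chunks]
  unfold sort_by_columns_alt
  by_cases h : PySem.List.sorted data (fun x => x.1) false = []
  · simp [h, pvChunks]
  · simp only [h]
    rw [show (PySem.List.slice (PySem.List.sorted data (fun x => x.1) false) (some 1) none)
        = (PySem.List.sorted data (fun x => x.1) false).tail from PySem.List.slice_from_one _]
    rw [← pvB_eq_chunks t _ h]
    rfl
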